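-- pv_equiv track=rewrite | github.com/syntra-vindevoy/python-1-2024 | src/chapter9(lists)/list_ex.py | split_on_upper_and_space_c
-- ===== SOURCE A (Python) =====
-- def split_on_upper_and_space_c(s):
--     # Step through indexes of the string to identify start of new words
--     words = [
--         s[start:end]
--         for start, end in zip(
--             [0] + [i for i in range(1, len(s)) if s[i].isupper() or s[i].isspace()],
--             [i for i in range(1, len(s)) if s[i].isupper() or s[i].isspace()] + [len(s)]
--         )
--     ]
--     # Filter out empty words and strip spaces
--     return [word for word in words if word.strip()]
-- ===== SOURCE B (Python) =====
-- def split_on_upper_and_space_c(s):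
--     # Single left-to-right pass: keep a current-word buffer, start a new word
--     # before every uppercase/space character (never at index 0).
--     words = []
--     buf = []
--     for i, c in enumerate(s):
--         if i > 0 and (c.isupper() or c.isspace()):
--             words.append(''.join(buf))
--             buf = []
--         buf.append(c)
--     words.append(''.join(buf))
--     return [w for w in words if w.strip()]
-- ===== Notes on version B (the rewrite author's own statement) =====
-- stated objective: simpler
-- what changed: Replaces the index-table-plus-zip-slicing comprehension (which builds the boundary list twice and re-slices the string per word) with a single accumulation pass that maintains a current-word buffer and flushes it before each uppercase/space character (never at index 0).
import Mathlib
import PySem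

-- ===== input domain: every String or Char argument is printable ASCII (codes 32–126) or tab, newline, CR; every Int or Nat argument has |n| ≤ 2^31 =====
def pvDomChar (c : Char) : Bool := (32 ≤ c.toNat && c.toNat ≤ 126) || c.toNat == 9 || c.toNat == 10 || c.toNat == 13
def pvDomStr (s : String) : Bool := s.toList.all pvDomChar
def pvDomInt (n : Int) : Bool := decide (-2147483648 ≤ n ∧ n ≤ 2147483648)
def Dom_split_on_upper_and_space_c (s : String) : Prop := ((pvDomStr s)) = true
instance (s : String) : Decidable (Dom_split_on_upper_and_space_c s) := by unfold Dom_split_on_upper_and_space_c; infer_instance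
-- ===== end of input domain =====

-- B replaces A's boundary-index table + zip slicing by one accumulation pass with a
-- current-word buffer (objective: simpler); return values proved equal on all strings.

-- shared character predicate: c.isupper() or c.isspace()
def pvBrk (c : Char) : Bool := PySem.Chars.isupper c || PySem.Chars.isspace c

-- ===== PORT A =====
-- the boundary comprehension [i for i in range(1, len(s)) if s[i].isupper() or s[i].isspace()]
def pvIdxs (cs : List Char) : List Int :=
  (PySem.List.pyRange 1 (cs.length : Int) 1).filter
    (fun i => pvBrk (PySem.List.pyGetD cs i ' '))

def split_on_upper_and_space_c (s : String) : List String :=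
  (((List.zip ((0 : Int) :: pvIdxs s.toList) (pvIdxs s.toList ++ [(s.toList.length : Int)])).map
      (fun p => PySem.List.slice s.toList (some p.1) (some p.2))).filter
    (fun w => !(PySem.Chars.strip w).isEmpty)).map String.ofList

-- ===== PORT B =====
-- loop body: flush the buffer before an uppercase/space char at i > 0, then append c
def pvStep (st : List (List Char) × List Char) (ic : Int × Char) :
    List (List Char) × List Char :=
  if 0 < ic.1 ∧ pvBrk ic.2 = true then (st.1 ++ [st.2], [ic.2]) else (st.1, st.2 ++ [ic.2])

def split_on_upper_and_space_c_alt (s : String) : List String :=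
  let st := (PySem.List.enumerate s.toList 0).foldl pvStep ([], [])
  ((st.1 ++ [st.2]).filter (fun w => !(PySem.Chars.strip w).isEmpty)).map String.ofList

-- ===== PRECONDITION & SPEC =====
def Spec_split_on_upper_and_space_c (s : String) (out : List String) : Prop := out = split_on_upper_and_space_c_alt s
instance (s : String) (out : List String) : Decidable (Spec_split_on_upper_and_space_c s out) := by unfold Spec_split_on_upper_and_space_c; infer_instance

-- ===== CLAIM (what is proved, stated in full; the proofs are below) =====
def Claim_equal_split_on_upper_and_space_c : Prop := ∀ (s : String), Dom_split_on_upper_and_space_c s → Spec_split_on_upper_and_space_c s (split_on_upper_and_space_c s)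

-- ===== LEMMAS AND PROOFS =====

-- adjacent pairs of a boundary list
def pairsAdj : List Int → List (Int × Int)
  | [] => []
  | [_] => []
  | a :: b :: t => (a, b) :: pairsAdj (b :: t)

theorem zip_eq_pairsAdj (a : Int) (bs : List Int) (e : Int) :
    List.zip (a :: bs) (bs ++ [e]) = pairsAdj (a :: bs) ++ [(bs.getLastD a, e)] := by
  induction bs generalizing a with
  | nil => simp [pairsAdj]
  | cons b t ih =>
    rw [List.cons_append, List.zip_cons_cons, ih b, pairsAdj, List.getLastD_cons]
    rfl

theorem pairsAdj_append (a : Int) (bs : List Int) (e : Int) :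
    pairsAdj ((a :: bs) ++ [e]) = pairsAdj (a :: bs) ++ [(bs.getLastD a, e)] := by
  induction bs generalizing a with
  | nil => simp [pairsAdj]
  | cons b t ih =>
    rw [List.cons_append, List.cons_append, pairsAdj, ← List.cons_append, ih b,
      pairsAdj, List.getLastD_cons]
    rfl

theorem mem_pairsAdj (p : Int × Int) (l : List Int) (h : p ∈ pairsAdj l) :
    p.1 ∈ l ∧ p.2 ∈ l := by
  induction l using pairsAdj.induct with
  | case1 => simp [pairsAdj] at h
  | case2 => simp [pairsAdj] at h
  | case3 a b t ih =>
    simp only [pairsAdj, List.mem_cons] at h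
    rcases h with h | h
    · subst h; simp
    · rcases ih h with ⟨h1, h2⟩
      exact ⟨List.mem_cons_of_mem _ h1, List.mem_cons_of_mem _ h2⟩

theorem mem_pvIdxs (cs : List Char) (b : Int) (h : b ∈ pvIdxs cs) :
    1 ≤ b ∧ b < (cs.length : Int) := by
  unfold pvIdxs at h
  rcases List.mem_filter.mp h with ⟨hr, _⟩
  exact (PySem.List.mem_pyRange_one.mp hr)

theorem getLastD_mem (l : List Int) (a : Int) : l.getLastD a ∈ a :: l := by
  induction l generalizing a with
  | nil => simp
  | cons b t ih =>
    rw [List.getLastD_cons]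
    rcases List.mem_cons.mp (ih b) with h | h
    · rw [h]; simp
    · exact List.mem_cons_of_mem _ (List.mem_cons_of_mem _ h)

-- slices are unchanged by appending a char, as long as the bounds stay within xs
theorem slice_append_of_le {α : Type} (xs : List α) (c : α) (a b : Int)
    (ha : 0 ≤ a) (han : a ≤ (xs.length : Int)) (hb : 0 ≤ b) (hbn : b ≤ (xs.length : Int)) :
    PySem.List.slice (xs ++ [c]) (some a) (some b) = PySem.List.slice xs (some a) (some b) := by
  rw [PySem.List.slice_toNat _ ha hb, PySem.List.slice_toNat _ ha hb]
  rw [List.drop_append_of_le_length (by omega)]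
  rw [List.take_append_of_le_length (by simp; omega)]

-- extending the stop bound past the end picks up exactly the appended char
theorem slice_append_snoc {α : Type} (xs : List α) (c : α) (a : Int)
    (ha : 0 ≤ a) (han : a ≤ (xs.length : Int)) :
    PySem.List.slice (xs ++ [c]) (some a) (some ((xs.length : Int) + 1)) =
      PySem.List.slice xs (some a) (some (xs.length : Int)) ++ [c] := by
  rw [PySem.List.slice_toNat _ ha (by omega), PySem.List.slice_toNat _ ha (by omega)]
  rw [List.drop_append_of_le_length (by omega)]
  rw [List.take_of_length_le (by simp only [List.length_append, List.length_drop,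
    List.length_cons, List.length_nil]; omega), List.take_of_length_le
    (by simp only [List.length_drop]; omega)]

-- the boundary list of cs ++ [c]
theorem pvIdxs_append (cs : List Char) (c : Char) :
    pvIdxs (cs ++ [c]) =
      pvIdxs cs ++ (if 1 ≤ (cs.length : Int) ∧ pvBrk c = true then [(cs.length : Int)] else []) := by
  unfold pvIdxs
  have hlen : (((cs ++ [c]).length : Nat) : Int) = (cs.length : Int) + 1 := by
    simp
  rw [hlen]
  by_cases hn : 1 ≤ (cs.length : Int)
  · rw [PySem.List.pyRange_one_succ_right hn, List.filter_append]
    have hfc : ∀ i ∈ PySem.List.pyRange 1 (cs.length : Int) 1,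
        pvBrk (PySem.List.pyGetD (cs ++ [c]) i ' ') = pvBrk (PySem.List.pyGetD cs i ' ') := by
      intro i hi
      rcases PySem.List.mem_pyRange_one.mp hi with ⟨h1, h2⟩
      rw [PySem.List.pyGetD_eq_getElem _ _ (by omega) (by simp; omega),
        PySem.List.pyGetD_eq_getElem _ _ (by omega) h2,
        List.getElem_append_left]
    rw [List.filter_congr hfc]
    have hc : PySem.List.pyGetD (cs ++ [c]) (cs.length : Int) ' ' = c := by
      rw [PySem.List.pyGetD_eq_getElem _ _ (by omega) (by simp)]
      simp
    simp only [List.filter_cons, List.filter_nil, hc]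
    by_cases hbc : pvBrk c = true
    · simp [hbc, hn]
    · simp [hbc]
  · have h0 : cs.length = 0 := by omega
    rcases List.length_eq_zero_iff.mp h0 with rfl
    simp [PySem.List.pyRange_one_eq_nil]

-- loop state after the fold
def pvS (cs : List Char) : List (List Char) × List Char :=
  (PySem.List.enumerate cs 0).foldl pvStep ([], [])

theorem pvS_append (cs : List Char) (c : Char) :
    pvS (cs ++ [c]) = pvStep (pvS cs) ((cs.length : Int), c) := by
  unfold pvS
  rw [PySem.List.enumerate_append]
  simp [PySem.List.enumerate_cons, PySem.List.enumerate_nil, List.foldl_append]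

-- the fold invariant: finished words are the slices between adjacent boundaries,
-- the buffer is the slice from the last boundary to the end
theorem pvS_invariant (cs : List Char) :
    (pvS cs).1 = (pairsAdj ((0 : Int) :: pvIdxs cs)).map
        (fun p => PySem.List.slice cs (some p.1) (some p.2)) ∧
    (pvS cs).2 = PySem.List.slice cs (some ((pvIdxs cs).getLastD 0)) (some (cs.length : Int)) := by
  induction cs using List.reverseRecOn with
  | nil => exact ⟨rfl, rfl⟩
  | append_singleton cs c ih =>
    have hbnd : ∀ x ∈ (0 : Int) :: pvIdxs cs, 0 ≤ x ∧ x ≤ (cs.length : Int) := by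
      intro x hx
      rcases List.mem_cons.mp hx with rfl | hx
      · exact ⟨le_refl 0, by positivity⟩
      · have := mem_pvIdxs cs x hx; omega
    have hL : ∀ p ∈ pairsAdj ((0 : Int) :: pvIdxs cs),
        PySem.List.slice (cs ++ [c]) (some p.1) (some p.2)
          = PySem.List.slice cs (some p.1) (some p.2) := by
      intro p hp
      rcases mem_pairsAdj p _ hp with ⟨h1, h2⟩
      rcases hbnd _ h1 with ⟨h1a, h1b⟩
      rcases hbnd _ h2 with ⟨h2a, h2b⟩
      exact slice_append_of_le cs c p.1 p.2 h1a h1b h2a h2b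
    have hlastmem := getLastD_mem (pvIdxs cs) 0
    rcases hbnd _ hlastmem with ⟨hla, hlb⟩
    have hlen : (((cs ++ [c]).length : Nat) : Int) = (cs.length : Int) + 1 := by simp
    rw [pvS_append, pvIdxs_append]
    by_cases hc : 1 ≤ (cs.length : Int) ∧ pvBrk c = true
    · rw [if_pos hc]
      have hstep : pvStep (pvS cs) ((cs.length : Int), c)
          = ((pvS cs).1 ++ [(pvS cs).2], [c]) := by
        unfold pvStep
        rw [if_pos ⟨by omega, hc.2⟩]
      rw [hstep]
      constructor
      · show _ = (pairsAdj (((0 : Int) :: pvIdxs cs) ++ [(cs.length : Int)])).map _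
        rw [pairsAdj_append, List.map_append, List.map_congr_left hL, ← ih.1,
          List.map_singleton]
        rw [slice_append_of_le cs c _ _ hla hlb (by omega) (by omega), ← ih.2]
      · show [c] = PySem.List.slice (cs ++ [c])
            (some ((pvIdxs cs ++ [(cs.length : Int)]).getLastD 0)) (some _)
        rw [List.getLastD_concat, hlen,
          slice_append_snoc cs c _ (by omega) (by omega),
          PySem.List.slice_toNat _ (by omega) (by omega)]
        simp
    · rw [if_neg hc]
      have hstep : pvStep (pvS cs) ((cs.length : Int), c)
          = ((pvS cs).1, (pvS cs).2 ++ [c]) := by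
        unfold pvStep
        rw [if_neg (by intro h; exact hc ⟨by omega, h.2⟩)]
      rw [hstep, List.append_nil]
      constructor
      · rw [List.map_congr_left hL, ← ih.1]
      · rw [hlen, slice_append_snoc cs c _ hla hlb, ← ih.2]

theorem ports_eq (cs : List Char) :
    (((List.zip ((0 : Int) :: pvIdxs cs) (pvIdxs cs ++ [(cs.length : Int)])).map
        (fun p => PySem.List.slice cs (some p.1) (some p.2))).filter
      (fun w => !(PySem.Chars.strip w).isEmpty)).map String.ofList =
    ((((PySem.List.enumerate cs 0).foldl pvStep ([], [])).1 ++
        [((PySem.List.enumerate cs 0).foldl pvStep ([], [])).2]).filter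
      (fun w => !(PySem.Chars.strip w).isEmpty)).map String.ofList := by
  rcases pvS_invariant cs with ⟨h1, h2⟩
  rw [zip_eq_pairsAdj, List.map_append, ← h1, List.map_singleton, ← h2]
  rfl

-- ===== VERDICT (by name: the statement is the Claim_ definition above) =====
theorem split_on_upper_and_space_c_spec : Claim_equal_split_on_upper_and_space_c := by
  intro s _
  exact ports_eq s.toList
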